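-- pv_equiv track=rewrite | github.com/TMDDraGon/VR-WEB | web/app/views.py | cal_cross_roundabout
-- ===== SOURCE A (Python) =====
-- def cal_cross_roundabout(crosswalk,roundabout):
--     count = 0
--     crosswalk_val = []
--     for i in range(len(crosswalk)):
--         if crosswalk[i] == 1:
--             count += 1
--         if i == 2:
--             crosswalk_val.append(count*300)
--             count = 0
--     crosswalk_val.append(count*300)
--
--     count = 0
--     roundabout_val = []
--     for i in range(len(roundabout)):
--         if roundabout[i] == 1:
--             count += 1
--         if i == 4:
--             roundabout_val.append(count*180)
--             count = 0
--     roundabout_val.append(count*180)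
--
--     return crosswalk_val,roundabout_val
-- ===== SOURCE B (Python) =====
-- def cal_cross_roundabout(crosswalk, roundabout):
--     def seg(xs, cut, weight):
--         if len(xs) >= cut:
--             return [xs[:cut].count(1) * weight, xs[cut:].count(1) * weight]
--         return [xs.count(1) * weight]
--     return seg(crosswalk, 3, 300), seg(roundabout, 5, 180)
-- ===== Notes on version B (the rewrite author's own statement) =====
-- stated objective: simpler
-- what changed: Replaces the two index-driven accumulator loops (running counter reset at a magic index) with one shared helper that slices the list at the segment boundary and multiplies each slice's count of 1s by the weight.
import Mathlib
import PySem

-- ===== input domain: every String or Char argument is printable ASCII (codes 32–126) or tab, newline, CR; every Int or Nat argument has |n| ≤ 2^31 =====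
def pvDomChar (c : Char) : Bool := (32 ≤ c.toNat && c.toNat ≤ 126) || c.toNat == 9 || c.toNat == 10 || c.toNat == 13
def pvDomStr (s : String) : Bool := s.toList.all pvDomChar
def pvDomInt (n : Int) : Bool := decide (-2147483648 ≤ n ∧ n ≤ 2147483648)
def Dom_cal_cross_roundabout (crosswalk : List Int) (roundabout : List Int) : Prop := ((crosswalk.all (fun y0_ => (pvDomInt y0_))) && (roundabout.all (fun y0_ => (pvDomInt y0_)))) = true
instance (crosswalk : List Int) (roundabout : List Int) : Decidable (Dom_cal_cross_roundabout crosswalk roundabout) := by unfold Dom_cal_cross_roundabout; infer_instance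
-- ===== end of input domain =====

-- B replaces A's index-driven accumulator loops (counter reset at a magic index) by
-- slicing each list at its segment boundary and counting 1s per slice (objective: simpler).

-- ===== PORT A =====
-- literal port: 'for i in range(len(xs))' as a fold over the index range; the loop
-- state is (count, accumulated value list), the element xs[i] is read in range.
def cal_cross_roundabout (crosswalk : List Int) (roundabout : List Int) : List Int × List Int :=
  let s1 := (PySem.List.pyRange 0 (crosswalk.length : Int) 1).foldl
    (fun (st : Int × List Int) i =>
      let count := if PySem.List.pyGetD crosswalk i 0 == 1 then st.1 + 1 else st.1
      if i == 2 then (0, st.2 ++ [count * 300]) else (count, st.2)) (0, [])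
  let crosswalk_val := s1.2 ++ [s1.1 * 300]
  let s2 := (PySem.List.pyRange 0 (roundabout.length : Int) 1).foldl
    (fun (st : Int × List Int) i =>
      let count := if PySem.List.pyGetD roundabout i 0 == 1 then st.1 + 1 else st.1
      if i == 4 then (0, st.2 ++ [count * 180]) else (count, st.2)) (0, [])
  let roundabout_val := s2.2 ++ [s2.1 * 180]
  (crosswalk_val, roundabout_val)

-- ===== PORT B =====
-- helper 'seg' of Source B: xs[:cut].count(1)*w and xs[cut:].count(1)*w
def pvSeg (xs : List Int) (cut : Nat) (w : Int) : List Int :=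
  if cut ≤ xs.length then
    [(PySem.List.count (PySem.List.slice xs none (some (cut : Int))) 1 : Int) * w,
     (PySem.List.count (PySem.List.slice xs (some (cut : Int)) none) 1 : Int) * w]
  else
    [(PySem.List.count xs 1 : Int) * w]

def cal_cross_roundabout_alt (crosswalk : List Int) (roundabout : List Int) : List Int × List Int :=
  (pvSeg crosswalk 3 300, pvSeg roundabout 5 180)

-- ===== PRECONDITION & SPEC =====
def Spec_cal_cross_roundabout (crosswalk : List Int) (roundabout : List Int) (out : List Int × List Int) : Prop := out = cal_cross_roundabout_alt crosswalk roundabout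
instance (crosswalk : List Int) (roundabout : List Int) (out : List Int × List Int) : Decidable (Spec_cal_cross_roundabout crosswalk roundabout out) := by unfold Spec_cal_cross_roundabout; infer_instance

-- ===== CLAIM (what is proved, stated in full; the proofs are below) =====
def Claim_equal_cal_cross_roundabout : Prop := ∀ (crosswalk : List Int) (roundabout : List Int), Dom_cal_cross_roundabout crosswalk roundabout → Spec_cal_cross_roundabout crosswalk roundabout (cal_cross_roundabout crosswalk roundabout)

-- ===== LEMMAS AND PROOFS =====

-- the loop body of A's loops, abstracted over the list, the trigger index and the weight
def pvStep (xs : List Int) (b w : Int) (st : Int × List Int) (i : Int) : Int × List Int :=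
  let count := if PySem.List.pyGetD xs i 0 == 1 then st.1 + 1 else st.1
  if i == b then (0, st.2 ++ [count * w]) else (count, st.2)

-- number of 1s among xs[a], …, xs[n-1]
def pvOnes (xs : List Int) (a n : Int) : Int :=
  ((PySem.List.pyRange a n 1).map
    (fun i => if PySem.List.pyGetD xs i 0 == 1 then (1 : Int) else 0)).sum

lemma pvOnes_succ_right (xs : List Int) {a n : Int} (h : a ≤ n) :
    pvOnes xs a (n + 1) = pvOnes xs a n +
      (if PySem.List.pyGetD xs n 0 == 1 then (1 : Int) else 0) := by
  simp [pvOnes, PySem.List.pyRange_one_succ_right h]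

-- a stretch of the loop that never hits the trigger index only counts
lemma pvStep_noHit (xs : List Int) (b w : Int) :
    ∀ (k : Nat) (a : Int) (c : Int) (acc : List Int), a + k ≤ b ∨ b < a →
      (PySem.List.pyRange a (a + k) 1).foldl (pvStep xs b w) (c, acc)
        = (c + pvOnes xs a (a + k), acc) := by
  intro k
  induction k with
  | zero =>
    intro a c acc _
    rw [show a + ((0:Nat):Int) = a by omega]
    simp [pvOnes, PySem.List.pyRange_one_eq_nil (le_refl a)]
  | succ m ih =>
    intro a c acc hb
    have hlt : a < a + ((m : Int) + 1) := by omega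
    rw [show ((m + 1 : Nat) : Int) = (m : Int) + 1 by push_cast; ring]
    rw [PySem.List.pyRange_one_cons hlt, List.foldl_cons]
    have hne : (a == b) = false := by
      simp only [beq_eq_false_iff_ne]; omega
    have hstep : pvStep xs b w (c, acc) a
        = ((if PySem.List.pyGetD xs a 0 == 1 then c + 1 else c), acc) := by
      simp only [pvStep, hne, Bool.false_eq_true, if_false]
    rw [hstep]
    have harg : a + ((m : Int) + 1) = (a + 1) + (m : Int) := by ring
    rw [harg, ih (a + 1) _ acc (by omega)]
    have h1 : pvOnes xs a (a + 1 + (m : Int)) =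
        (if PySem.List.pyGetD xs a 0 == 1 then (1:Int) else 0) + pvOnes xs (a + 1) (a + 1 + (m : Int)) := by
      rw [pvOnes, PySem.List.pyRange_one_cons (show a < a + 1 + (m : Int) by omega)]
      simp [pvOnes]
    rw [h1]
    simp only [Prod.mk.injEq]
    refine ⟨?_, trivial⟩
    split <;> ring

-- same, stated for an arbitrary end point of the index range
lemma pvStep_noHit' (xs : List Int) (b w a n c : Int) (acc : List Int)
    (h0 : a ≤ n) (hb : n ≤ b ∨ b < a) :
    (PySem.List.pyRange a n 1).foldl (pvStep xs b w) (c, acc)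
      = (c + pvOnes xs a n, acc) := by
  obtain ⟨k, hk⟩ : ∃ k : Nat, n = a + k := ⟨(n - a).toNat, by omega⟩
  subst hk
  exact pvStep_noHit xs b w k a c acc (by omega)

-- pvOnes over a full suffix of indices is the count of 1s in the dropped list
lemma pvOnes_drop (xs : List Int) (a : Nat) :
    pvOnes xs (a : Int) (xs.length : Int) = ((xs.drop a).count 1 : Int) := by
  unfold pvOnes
  rw [show (fun i => if PySem.List.pyGetD xs i 0 == 1 then (1 : Int) else 0)
      = (fun x => if x == 1 then (1 : Int) else 0) ∘ (fun j => PySem.List.pyGetD xs j 0) from rfl]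
  rw [← List.map_map]
  rw [PySem.List.map_pyGetD_pyRange' xs 0 (a := (a : Int)) (by positivity)]
  rw [Int.toNat_natCast]
  rw [PySem.List.sum_map_ite_one_zero]
  simp [List.count]

-- pvOnes over an initial segment of indices is the count of 1s in the taken prefix
lemma pvOnes_take (xs : List Int) (k : Nat) (hk : k ≤ xs.length) :
    pvOnes xs 0 (k : Int) = ((xs.take k).count 1 : Int) := by
  have hlen : (xs.take k).length = k := by
    simp [List.length_take, Nat.min_eq_left hk]
  have hcong : pvOnes xs 0 (k : Int) = pvOnes (xs.take k) 0 (k : Int) := by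
    unfold pvOnes
    apply congrArg List.sum
    apply List.map_congr_left
    intro i hi
    rw [PySem.List.mem_pyRange_one] at hi
    have h0 : 0 ≤ i := hi.1
    have hik : i < (k : Int) := hi.2
    rw [PySem.List.pyGetD_eq_getElem xs 0 h0 (by omega),
        PySem.List.pyGetD_eq_getElem (xs.take k) 0 h0 (by rw [hlen]; omega)]
    simp [List.getElem_take]
  rw [hcong]
  have h2 := pvOnes_drop (xs.take k) 0
  rw [List.drop_zero] at h2
  rw [show ((k : Int)) = ((xs.take k).length : Int) by rw [hlen]]
  simpa using h2

-- the generic segment loop equals pvSeg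
lemma pvLoop_eq_seg (xs : List Int) (b : Nat) (w : Int) :
    (let s := (PySem.List.pyRange 0 (xs.length : Int) 1).foldl (pvStep xs (b : Int) w) (0, []);
     s.2 ++ [s.1 * w]) = pvSeg xs (b + 1) w := by
  by_cases hlen : b + 1 ≤ xs.length
  · have hsplit : PySem.List.pyRange 0 (xs.length : Int) 1
        = (PySem.List.pyRange 0 (b : Int) 1 ++ [(b : Int)]) ++ PySem.List.pyRange ((b : Int) + 1) (xs.length : Int) 1 := by
      rw [PySem.List.pyRange_one_append 0 ((b : Int) + 1) (xs.length : Int) (by positivity) (by exact_mod_cast hlen)]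
      rw [PySem.List.pyRange_one_succ_right (by positivity : (0:Int) ≤ (b:Int))]
    simp only [hsplit, List.foldl_append, List.foldl_cons, List.foldl_nil]
    rw [pvStep_noHit' xs (b : Int) w 0 (b : Int) 0 [] (by positivity) (by omega)]
    have hone : pvOnes xs 0 ((b:Int)+1) = pvOnes xs 0 (b:Int) +
        (if PySem.List.pyGetD xs (b:Int) 0 == 1 then (1:Int) else 0) :=
      pvOnes_succ_right xs (by positivity)
    have hstep : pvStep xs (b : Int) w (0 + pvOnes xs 0 (b:Int), []) (b : Int)
        = (0, [pvOnes xs 0 ((b:Int)+1) * w]) := by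
      simp only [pvStep, beq_self_eq_true, if_true, List.nil_append, zero_add, hone]
      split <;> simp
    rw [hstep]
    rw [pvStep_noHit' xs (b : Int) w ((b:Int)+1) (xs.length : Int) 0
        [pvOnes xs 0 ((b:Int)+1) * w] (by exact_mod_cast hlen) (by omega)]
    have htk : pvOnes xs 0 ((b:Int)+1) = ((xs.take (b+1)).count 1 : Int) := by
      have := pvOnes_take xs (b+1) hlen
      rw [show (((b+1 : Nat)) : Int) = (b:Int)+1 by push_cast; ring] at this
      exact this
    have hdr : pvOnes xs ((b:Int)+1) (xs.length : Int) = ((xs.drop (b+1)).count 1 : Int) := by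
      have := pvOnes_drop xs (b+1)
      rw [show (((b+1 : Nat)) : Int) = (b:Int)+1 by push_cast; ring] at this
      exact this
    simp only [pvSeg, if_pos hlen, htk, hdr, zero_add]
    rw [PySem.List.count_eq, PySem.List.count_eq,
        PySem.List.slice_to_natCast xs (b+1), PySem.List.slice_from_natCast xs (b+1)]
    simp
  · have hle : (xs.length : Int) ≤ (b : Int) := by
      have : xs.length ≤ b := by omega
      exact_mod_cast this
    simp only []
    rw [pvStep_noHit' xs (b : Int) w 0 (xs.length : Int) 0 [] (by positivity) (Or.inl hle)]
    have h0 := pvOnes_drop xs 0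
    simp at h0
    simp only [pvSeg, if_neg hlen, zero_add]
    rw [PySem.List.count_eq, h0]
    rfl

-- ===== VERDICT (by name: the statement is the Claim_ definition above) =====
theorem cal_cross_roundabout_spec : Claim_equal_cal_cross_roundabout := by
  intro crosswalk roundabout _
  unfold Spec_cal_cross_roundabout cal_cross_roundabout cal_cross_roundabout_alt
  have h1 := pvLoop_eq_seg crosswalk 2 300
  have h2 := pvLoop_eq_seg roundabout 4 180
  push_cast at h1 h2
  simp only [Prod.mk.injEq]
  exact ⟨h1, h2⟩
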